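-- pv_equiv track=rewrite | github.com/raistlinJ/core-topo-gen | core_topo_gen/planning/node_plan.py | _normalize_role_name
-- ===== SOURCE A (Python) =====
-- ALLOWED_HOST_ROLES = {"Server", "Workstation", "PC"}
--
-- def _normalize_role_name(role: str) -> str:
--     rl = (role or '').strip()
--     if not rl:
--         return 'PC'
--     if rl.lower() == 'random' or rl.lower() == 'host':
--         return 'PC'
--     # If already allowed (case-insensitive), standardize capitalization to canonical form
--     for ar in ALLOWED_HOST_ROLES:
--         if rl.lower() == ar.lower():
--             return ar
--     # Fallback to PC for any unknown label
--     return 'PC'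
-- ===== SOURCE B (Python) =====
-- _CANONICAL = {"server": "Server", "workstation": "Workstation", "pc": "PC"}
--
-- def _normalize_role_name(role: str) -> str:
--     return _CANONICAL.get((role or '').strip().lower(), 'PC')
-- ===== Notes on version B (the rewrite author's own statement) =====
-- stated objective: simpler
-- what changed: Replaced the empty-string branch, the 'random'/'host' branch and the case-insensitive scan loop over the allowed-roles set by a single default-valued lookup in a lowercase-keyed canonical map; all non-canonical cases collapse into the one default.
import Mathlib
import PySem

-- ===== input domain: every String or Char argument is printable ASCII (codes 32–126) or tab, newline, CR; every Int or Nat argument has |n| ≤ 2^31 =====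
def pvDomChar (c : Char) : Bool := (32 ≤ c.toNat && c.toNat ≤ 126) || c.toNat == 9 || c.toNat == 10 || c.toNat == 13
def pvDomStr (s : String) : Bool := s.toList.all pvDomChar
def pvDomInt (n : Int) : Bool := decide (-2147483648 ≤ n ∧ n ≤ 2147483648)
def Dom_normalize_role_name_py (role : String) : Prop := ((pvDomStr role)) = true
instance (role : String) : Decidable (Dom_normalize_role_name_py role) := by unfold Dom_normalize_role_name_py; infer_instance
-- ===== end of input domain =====

-- B replaces A's branches + case-insensitive scan of the role set by one default-valued lookup
-- in a lowercase-keyed canonical map (objective: simpler).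
-- ===== PORT A =====
-- ALLOWED_HOST_ROLES = {"Server", "Workstation", "PC"}; the loop's set iteration order does not
-- affect the result (lowercased elements are pairwise distinct), so the literal order is exact.
def ALLOWED_HOST_ROLES : PySem.Set String := PySem.Set.ofList ["Server", "Workstation", "PC"]

def pvScanRoles (rl : String) : List String → String
  | [] => "PC"
  | ar :: rest => if PySem.Str.lower rl = PySem.Str.lower ar then ar else pvScanRoles rl rest

def normalize_role_name_py (role : String) : String :=
  let rl := PySem.Str.strip role
  if rl = "" then "PC"
  else if PySem.Str.lower rl = "random" ∨ PySem.Str.lower rl = "host" then "PC"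
  else pvScanRoles rl ALLOWED_HOST_ROLES

-- ===== PORT B =====
def pvCanonical : PySem.Dict String String :=
  PySem.Dict.ofList [("server", "Server"), ("workstation", "Workstation"), ("pc", "PC")]

def normalize_role_name_py_alt (role : String) : String :=
  pvCanonical.getD (PySem.Str.lower (PySem.Str.strip role)) "PC"

-- ===== PRECONDITION & SPEC =====
def Spec_normalize_role_name_py (role : String) (out : String) : Prop := out = normalize_role_name_py_alt role
instance (role : String) (out : String) : Decidable (Spec_normalize_role_name_py role out) := by unfold Spec_normalize_role_name_py; infer_instance

-- ===== CLAIM (what is proved, stated in full; the proofs are below) =====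
def Claim_equal_normalize_role_name_py : Prop := ∀ (role : String), Dom_normalize_role_name_py role → Spec_normalize_role_name_py role (normalize_role_name_py role)

-- ===== LEMMAS AND PROOFS =====
theorem pv_scan_eq (rl : String) :
    pvScanRoles rl ALLOWED_HOST_ROLES
    = (if PySem.Str.lower rl = "server" then "Server"
       else if PySem.Str.lower rl = "workstation" then "Workstation"
       else if PySem.Str.lower rl = "pc" then "PC" else "PC") := by
  have e : ALLOWED_HOST_ROLES = ["Server", "Workstation", "PC"] := by decide
  have h1 : PySem.Str.lower "Server" = "server" := by decide
  have h2 : PySem.Str.lower "Workstation" = "workstation" := by decide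
  have h3 : PySem.Str.lower "PC" = "pc" := by decide
  rw [e]
  simp only [pvScanRoles, h1, h2, h3]

theorem pv_getD_eq (k : String) :
    pvCanonical.getD k "PC"
    = (if k = "server" then "Server"
       else if k = "workstation" then "Workstation"
       else if k = "pc" then "PC" else "PC") := by
  have e : pvCanonical = PySem.Dict.mk [("server", "Server"), ("workstation", "Workstation"), ("pc", "PC")] := by decide
  rw [e]
  simp only [PySem.Dict.getD, PySem.Dict.get?_mk_cons]
  by_cases h1 : "server" = k <;> by_cases h2 : "workstation" = k <;> by_cases h3 : "pc" = k <;>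
    simp [h1, h2, h3, Ne.symm] <;> (try simp_all [PySem.Dict.get?])

theorem pv_core (rl : String) :
    (if rl = "" then "PC"
     else if PySem.Str.lower rl = "random" ∨ PySem.Str.lower rl = "host" then "PC"
     else pvScanRoles rl ALLOWED_HOST_ROLES)
    = pvCanonical.getD (PySem.Str.lower rl) "PC" := by
  rw [pv_getD_eq, pv_scan_eq]
  by_cases h0 : rl = ""
  · subst h0; decide
  · simp only [h0, if_false]
    split_ifs with h1 h2 h3 h4 <;> simp_all

-- ===== VERDICT (by name: the statement is the Claim_ definition above) =====
theorem normalize_role_name_py_spec : Claim_equal_normalize_role_name_py := by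
  intro role _
  unfold Spec_normalize_role_name_py normalize_role_name_py normalize_role_name_py_alt
  exact pv_core (PySem.Str.strip role)
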